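-- pv_equiv track=rewrite | github.com/adsabs/entity_extractor | streamlit_dashboard/components/autocomplete.py | filter_software_suggestions
-- ===== SOURCE A (Python) =====
-- from typing import List, Dict, Set
--
-- def filter_software_suggestions(query: str, software_names: List[str], max_suggestions: int = 10) -> List[str]:
--     """Filter software names based on user query for autocomplete suggestions."""
--     if not query:
--         return []
--
--     query_lower = query.lower()
--     suggestions = []
--
--     # Exact matches first
--     for name in software_names:
--         if name.lower().startswith(query_lower):
--             suggestions.append(name)
--
--     # Partial matches second (if not already included)
--     for name in software_names:
--         if query_lower in name.lower() and name not in suggestions: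
--             suggestions.append(name)
--
--     return suggestions[:max_suggestions]
-- ===== SOURCE B (Python) =====
-- def filter_software_suggestions(query, software_names, max_suggestions=10):
--     """Single pass: bucket each name as prefix or substring match, dedup substring bucket with a seen set."""
--     if not query:
--         return []
--     ql = query.lower()
--     prefix, substr, seen = [], [], set()
--     for name in software_names:
--         nl = name.lower()
--         if nl.startswith(ql):
--             prefix.append(name)
--         elif ql in nl and name not in seen:
--             substr.append(name)
--             seen.add(name)
--     return (prefix + substr)[:max_suggestions]
-- ===== Notes on version B (the rewrite author's own statement) =====
-- stated objective: alternative
-- what changed: Replaces A's two full scans plus a linear 'name not in suggestions' list scan per substring match with one bucketing pass that keeps a prefix list and a deduped substring list with a seen set.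
import Mathlib
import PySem

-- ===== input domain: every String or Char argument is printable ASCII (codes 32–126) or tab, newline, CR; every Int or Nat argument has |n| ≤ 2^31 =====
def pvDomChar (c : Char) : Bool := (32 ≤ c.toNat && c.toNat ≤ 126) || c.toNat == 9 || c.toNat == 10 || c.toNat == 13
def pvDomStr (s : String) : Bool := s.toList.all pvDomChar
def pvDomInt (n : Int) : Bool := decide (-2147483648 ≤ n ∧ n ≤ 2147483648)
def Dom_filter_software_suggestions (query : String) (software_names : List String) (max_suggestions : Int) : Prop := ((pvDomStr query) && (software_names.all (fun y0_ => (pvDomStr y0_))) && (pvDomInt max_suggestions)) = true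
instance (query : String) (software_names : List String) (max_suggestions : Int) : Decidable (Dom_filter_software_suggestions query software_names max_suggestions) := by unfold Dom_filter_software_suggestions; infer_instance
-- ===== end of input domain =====

-- B replaces A's two scans (with their linear list-membership dedup) by one bucketing pass with a seen set; return values proved equal.

-- ===== PORT A =====
def filter_software_suggestions (query : String) (software_names : List String) (max_suggestions : Int) : List String :=
  if query = "" then []
  else
    let query_lower := PySem.Str.lower query
    -- Exact matches first
    let suggestions := software_names.foldl (fun acc name =>
      if PySem.Str.startswith (PySem.Str.lower name) query_lower then acc ++ [name] else acc) []
    -- Partial matches second (if not already included)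
    let suggestions := software_names.foldl (fun acc name =>
      if PySem.Str.isIn query_lower (PySem.Str.lower name) && !(acc.contains name)
      then acc ++ [name] else acc) suggestions
    PySem.List.slice suggestions none (some max_suggestions)

-- ===== PORT B =====
def filter_software_suggestions_alt (query : String) (software_names : List String) (max_suggestions : Int) : List String :=
  if query = "" then []
  else
    let ql := PySem.Str.lower query
    let st := software_names.foldl
      (fun (s : List String × List String × PySem.Set String) name =>
        if PySem.Str.startswith (PySem.Str.lower name) ql then (s.1 ++ [name], s.2.1, s.2.2)
        else if PySem.Str.isIn ql (PySem.Str.lower name) && !(PySem.Set.contains s.2.2 name)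
        then (s.1, s.2.1 ++ [name], PySem.Set.add s.2.2 name)
        else s)
      ([], [], PySem.Set.empty)
    PySem.List.slice (st.1 ++ st.2.1) none (some max_suggestions)

-- ===== PRECONDITION & SPEC =====
def Spec_filter_software_suggestions (query : String) (software_names : List String) (max_suggestions : Int) (out : List String) : Prop := out = filter_software_suggestions_alt query software_names max_suggestions
instance (query : String) (software_names : List String) (max_suggestions : Int) (out : List String) : Decidable (Spec_filter_software_suggestions query software_names max_suggestions out) := by unfold Spec_filter_software_suggestions; infer_instance

-- ===== CLAIM (what is proved, stated in full; the proofs are below) =====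
def Claim_equal_filter_software_suggestions : Prop := ∀ (query : String) (software_names : List String) (max_suggestions : Int), Dom_filter_software_suggestions query software_names max_suggestions → Spec_filter_software_suggestions query software_names max_suggestions (filter_software_suggestions query software_names max_suggestions)

-- ===== LEMMAS AND PROOFS =====

-- the three loop bodies, named so the proofs stay readable (each is defeq to the lambda in its port)
def pvStepP (ql : String) (acc : List String) (n : String) : List String :=
  if PySem.Str.startswith (PySem.Str.lower n) ql then acc ++ [n] else acc

def pvStepA (ql : String) (acc : List String) (n : String) : List String :=
  if PySem.Str.isIn ql (PySem.Str.lower n) && !(acc.contains n) then acc ++ [n] else acc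

def pvStepS (ql : String) (acc : List String) (n : String) : List String :=
  if !(PySem.Str.startswith (PySem.Str.lower n) ql) && PySem.Str.isIn ql (PySem.Str.lower n)
      && !(acc.contains n)
  then acc ++ [n] else acc

def pvStepB (ql : String) (st : List String × List String × PySem.Set String) (n : String) :
    List String × List String × PySem.Set String :=
  if PySem.Str.startswith (PySem.Str.lower n) ql then (st.1 ++ [n], st.2.1, st.2.2)
  else if PySem.Str.isIn ql (PySem.Str.lower n) && !(PySem.Set.contains st.2.2 n)
  then (st.1, st.2.1 ++ [n], PySem.Set.add st.2.2 n)
  else st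

-- the deduped substring-only list both versions end up building
def pvSub (ql : String) (acc : List String) (ys : List String) : List String :=
  ys.foldl (pvStepS ql) acc

-- a prefix match is also a substring match
theorem pv_sw_imp_sub (ql n : String)
    (h : PySem.Str.startswith (PySem.Str.lower n) ql = true) :
    PySem.Str.isIn ql (PySem.Str.lower n) = true := by
  rw [PySem.Str.isIn_iff_infix, PySem.Str.toList_lower]
  have hp : ql.toList <+: PySem.Chars.lower n.toList :=
    (PySem.Chars.startswith_iff _ _).mp (by simpa using h)
  exact hp.isInfix

-- A's second pass, started on P ++ acc where P holds every prefix match of ys and no non-prefix name,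
-- equals P ++ (the substring-only dedup fold on acc)
theorem pv_passA (ql : String) (ys : List String) (P : List String) (acc : List String)
    (hP : ∀ n ∈ ys, PySem.Str.startswith (PySem.Str.lower n) ql = true → n ∈ P)
    (hNP : ∀ n, PySem.Str.startswith (PySem.Str.lower n) ql = false → n ∉ P) :
    ys.foldl (pvStepA ql) (P ++ acc) = P ++ pvSub ql acc ys := by
  induction ys generalizing acc with
  | nil => simp [pvSub]
  | cons n ys ih =>
    have hP' : ∀ m ∈ ys, PySem.Str.startswith (PySem.Str.lower m) ql = true → m ∈ P :=
      fun m hm => hP m (List.mem_cons_of_mem _ hm)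
    rw [List.foldl_cons, show pvSub ql acc (n :: ys) = pvSub ql (pvStepS ql acc n) ys from rfl]
    by_cases hsw : PySem.Str.startswith (PySem.Str.lower n) ql = true
    · have hswc : PySem.Chars.startswith (PySem.Chars.lower n.toList) ql.toList = true := by
        simpa using hsw
      have hsubc : PySem.Chars.isIn ql.toList (PySem.Chars.lower n.toList) = true := by
        simpa using pv_sw_imp_sub ql n hsw
      have hmem : n ∈ P := hP n List.mem_cons_self hsw
      have e1 : pvStepA ql (P ++ acc) n = P ++ acc := by simp [pvStepA, hsubc, hmem]
      have e2 : pvStepS ql acc n = acc := by simp [pvStepS, hswc]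
      rw [e1, e2]; exact ih acc hP'
    · have hsw' : PySem.Str.startswith (PySem.Str.lower n) ql = false := by simpa using hsw
      have hswc : PySem.Chars.startswith (PySem.Chars.lower n.toList) ql.toList = false := by
        simpa using hsw'
      have hnP : n ∉ P := hNP n hsw'
      by_cases hin : n ∈ acc
      · have e1 : pvStepA ql (P ++ acc) n = P ++ acc := by simp [pvStepA, hin]
        have e2 : pvStepS ql acc n = acc := by simp [pvStepS, hin]
        rw [e1, e2]; exact ih acc hP'
      · by_cases hsb : PySem.Str.isIn ql (PySem.Str.lower n) = true
        · have hsbc : PySem.Chars.isIn ql.toList (PySem.Chars.lower n.toList) = true := by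
            simpa using hsb
          have e1 : pvStepA ql (P ++ acc) n = P ++ (acc ++ [n]) := by
            simp [pvStepA, hsbc, hnP, hin]
          have e2 : pvStepS ql acc n = acc ++ [n] := by simp [pvStepS, hswc, hsbc, hin]
          rw [e1, e2]; exact ih (acc ++ [n]) hP'
        · have hsbc : PySem.Chars.isIn ql.toList (PySem.Chars.lower n.toList) = false := by
            simpa using hsb
          have e1 : pvStepA ql (P ++ acc) n = P ++ acc := by simp [pvStepA, hsbc]
          have e2 : pvStepS ql acc n = acc := by simp [pvStepS, hsbc]
          rw [e1, e2]; exact ih acc hP'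

-- B's single pass, with seen = the substring list itself, produces (prefix filter, substring dedup, same)
theorem pv_passB (ql : String) (ys : List String) (p s : List String) :
    ys.foldl (pvStepB ql) (p, s, s)
    = (p ++ ys.filter (fun n => PySem.Str.startswith (PySem.Str.lower n) ql),
       pvSub ql s ys, pvSub ql s ys) := by
  induction ys generalizing p s with
  | nil => simp [pvSub]
  | cons n ys ih =>
    rw [List.foldl_cons, show pvSub ql s (n :: ys) = pvSub ql (pvStepS ql s n) ys from rfl,
      List.filter_cons]
    by_cases hsw : PySem.Str.startswith (PySem.Str.lower n) ql = true
    · have hswc : PySem.Chars.startswith (PySem.Chars.lower n.toList) ql.toList = true := by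
        simpa using hsw
      have e1 : pvStepB ql (p, s, s) n = (p ++ [n], s, s) := by simp [pvStepB, hswc]
      have e2 : pvStepS ql s n = s := by simp [pvStepS, hswc]
      rw [e1, e2, ih (p ++ [n]) s]
      simp [hswc]
    · have hsw' : PySem.Str.startswith (PySem.Str.lower n) ql = false := by simpa using hsw
      have hswc : PySem.Chars.startswith (PySem.Chars.lower n.toList) ql.toList = false := by
        simpa using hsw'
      by_cases hin : n ∈ s
      · have e1 : pvStepB ql (p, s, s) n = (p, s, s) := by simp [pvStepB, hswc, hin]
        have e2 : pvStepS ql s n = s := by simp [pvStepS, hin]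
        rw [e1, e2, ih p s]
        simp [hswc]
      · by_cases hsb : PySem.Str.isIn ql (PySem.Str.lower n) = true
        · have hsbc : PySem.Chars.isIn ql.toList (PySem.Chars.lower n.toList) = true := by
            simpa using hsb
          have e1 : pvStepB ql (p, s, s) n = (p, s ++ [n], s ++ [n]) := by
            simp [pvStepB, hswc, hsbc, hin, PySem.Set.add]
          have e2 : pvStepS ql s n = s ++ [n] := by simp [pvStepS, hswc, hsbc, hin]
          rw [e1, e2, ih p (s ++ [n])]
          simp [hswc]
        · have hsbc : PySem.Chars.isIn ql.toList (PySem.Chars.lower n.toList) = false := by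
            simpa using hsb
          have e1 : pvStepB ql (p, s, s) n = (p, s, s) := by simp [pvStepB, hswc, hsbc]
          have e2 : pvStepS ql s n = s := by simp [pvStepS, hsbc]
          rw [e1, e2, ih p s]
          simp [hswc]

-- ===== VERDICT (by name: the statement is the Claim_ definition above) =====
theorem filter_software_suggestions_spec : Claim_equal_filter_software_suggestions := by
  intro query names m _
  show filter_software_suggestions query names m = filter_software_suggestions_alt query names m
  by_cases hq : query = ""
  · simp [filter_software_suggestions, filter_software_suggestions_alt, hq]
  · have eA : filter_software_suggestions query names m
        = PySem.List.slice
            (names.foldl (pvStepA (PySem.Str.lower query))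
              (names.foldl (pvStepP (PySem.Str.lower query)) []))
            none (some m) := by
      unfold filter_software_suggestions; rw [if_neg hq]; rfl
    have eB : filter_software_suggestions_alt query names m
        = PySem.List.slice
            ((names.foldl (pvStepB (PySem.Str.lower query)) ([], [], [])).1
              ++ (names.foldl (pvStepB (PySem.Str.lower query)) ([], [], [])).2.1)
            none (some m) := by
      unfold filter_software_suggestions_alt; rw [if_neg hq]; rfl
    rw [eA, eB]
    have hA1 : names.foldl (pvStepP (PySem.Str.lower query)) []
        = names.filter (fun n => PySem.Str.startswith (PySem.Str.lower n) (PySem.Str.lower query)) :=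
      (PySem.List.foldl_append_if_eq_filter
        (fun n => PySem.Str.startswith (PySem.Str.lower n) (PySem.Str.lower query)) names []).trans
        (List.nil_append _)
    have hA2 := pv_passA (PySem.Str.lower query) names
      (names.filter (fun n => PySem.Str.startswith (PySem.Str.lower n) (PySem.Str.lower query)))
      []
      (fun n hn hsw => List.mem_filter.mpr ⟨hn, hsw⟩)
      (fun n hsw hmem => absurd (List.mem_filter.mp hmem).2
        (by simp only [hsw]; exact Bool.false_ne_true))
    rw [List.append_nil] at hA2
    rw [hA1, hA2, pv_passB (PySem.Str.lower query) names [] []]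
    simp
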